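-- pv_equiv track=rewrite | github.com/yspreen/adventofcode | 2023/07/main.py | one_score
-- ===== SOURCE A (Python) =====
-- from string import ascii_lowercase
--
-- def one_score(hand):
--     counts = sorted([hand.count(c) for c in set(hand + ".")])
--     second_count, max_count = counts[-2:]
--     rank = 1
--     if max_count == 5:
--         rank = 7
--     if max_count == 4:
--         rank = 6
--     if max_count == 3 and second_count == 2:
--         rank = 5
--     elif max_count == 3:
--         rank = 4
--     if max_count == 2 and second_count == 2:
--         rank = 3
--     elif max_count == 2:
--         rank = 2
--     score = rank * (10**10)
--     for idx, c in enumerate(hand):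
--         score += 10 ** (8 - 2 * idx) * (ascii_lowercase.index(c) + 1)
--     return score
-- ===== SOURCE B (Python) =====
-- from string import ascii_lowercase
--
--
-- def one_score(hand):
--     # Rank via pair-counting: the number of index pairs (i, j) with hand[i] == hand[j]
--     # equals the sum of squared multiplicities, which for hands of length <= 5 uniquely
--     # identifies the multiplicity partition, hence the rank, via a small lookup table.
--     n = len(hand)
--     pairs = 0
--     for a in hand:
--         for b in hand:
--             if a == b:
--                 pairs += 1
--     RANK = {
--         (1, 1): 1,
--         (2, 2): 1, (2, 4): 2,
--         (3, 3): 1, (3, 5): 2, (3, 9): 4,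
--         (4, 4): 1, (4, 6): 2, (4, 8): 3, (4, 10): 4, (4, 16): 6,
--         (5, 5): 1, (5, 7): 2, (5, 9): 3, (5, 11): 4, (5, 13): 5, (5, 17): 6, (5, 25): 7,
--     }
--     rank = RANK[(n, pairs)]
--     # Positional tiebreak as a Horner evaluation in base 100, scaled to 5 slots.
--     tie = 0
--     for c in hand:
--         tie = tie * 100 + (ascii_lowercase.index(c) + 1)
--     return rank * 10 ** 10 + tie * 100 ** (5 - n)
-- ===== Notes on version B (the rewrite author's own statement) =====
-- stated objective: alternative
-- what changed: B never builds or sorts the count multiset: it counts equal index pairs (= sum of squared multiplicities), which for hands of length <= 5 uniquely identifies the multiplicity partition, and reads the rank from an 18-entry (length, pairs) lookup table; the positional tiebreak is a base-100 Horner fold scaled by 100**(5-n) instead of a sum of per-index power weights.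
-- outside the precondition, e.g. on one_score('aaaaaa'): A returns 10101010101.01, B raises KeyError
import Mathlib
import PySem

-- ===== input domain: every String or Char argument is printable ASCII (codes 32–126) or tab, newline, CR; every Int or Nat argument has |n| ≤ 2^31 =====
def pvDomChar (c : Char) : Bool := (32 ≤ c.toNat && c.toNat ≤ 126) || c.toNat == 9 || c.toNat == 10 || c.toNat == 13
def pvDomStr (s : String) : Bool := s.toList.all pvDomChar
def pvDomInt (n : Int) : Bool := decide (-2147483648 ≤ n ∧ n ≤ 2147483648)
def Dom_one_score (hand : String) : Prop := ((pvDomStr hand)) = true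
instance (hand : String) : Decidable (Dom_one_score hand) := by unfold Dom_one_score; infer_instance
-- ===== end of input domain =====

-- B drops A's sorted count-multiset entirely: it counts equal index pairs (= sum of squared
-- multiplicities), reads the rank from a (length, pairs) table, and computes the positional
-- tiebreak by a base-100 Horner fold; equivalence of the return value is proved on Pre_.

def asciiLowercaseList : List Char := "abcdefghijklmnopqrstuvwxyz".toList

-- ===== PORT A =====
-- set(hand + ".") is consumed only through sorted() with the identity key, so the
-- hash iteration order cannot affect the result; we map over the Set in insertion order.
def one_score (hand : String) : Int :=
  let counts : List Int :=
    PySem.List.sorted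
      ((PySem.Set.ofList (hand.toList ++ ['.'])).map
        (fun c => (PySem.List.count hand.toList c : Int)))
      (fun x => x) false
  -- 'second_count, max_count = counts[-2:]' raises ValueError when counts has one element
  -- (empty hand); that input is excluded by Pre_, getD 0 is a stand-in there.
  let second_count : Int := (PySem.List.pyGet? counts (-2)).getD 0
  let max_count : Int := (PySem.List.pyGet? counts (-1)).getD 0
  let rank : Int := 1
  let rank := if max_count = 5 then 7 else rank
  let rank := if max_count = 4 then 6 else rank
  let rank := if max_count = 3 ∧ second_count = 2 then 5
              else if max_count = 3 then 4 else rank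
  let rank := if max_count = 2 ∧ second_count = 2 then 3
              else if max_count = 2 then 2 else rank
  let score : Int := rank * 10 ^ 10
  -- 10 ** (8 - 2*idx): .toNat is exact for idx ≤ 4 (len ≤ 5, per Pre_; beyond, Python makes a float);
  -- ascii_lowercase.index(c) raises ValueError for a non-lowercase c (excluded by Pre_; getD 0 stand-in).
  (PySem.List.enumerate hand.toList 0).foldl
    (fun s p =>
      s + 10 ^ ((8 - 2 * p.1).toNat) *
        (((PySem.List.index? asciiLowercaseList p.2).getD 0 : Int) + 1))
    score

-- ===== PORT B =====
-- the RANK dict literal of Source B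
def rankTable : PySem.Dict (Int × Int) Int :=
  PySem.Dict.ofList
    [((1, 1), 1),
     ((2, 2), 1), ((2, 4), 2),
     ((3, 3), 1), ((3, 5), 2), ((3, 9), 4),
     ((4, 4), 1), ((4, 6), 2), ((4, 8), 3), ((4, 10), 4), ((4, 16), 6),
     ((5, 5), 1), ((5, 7), 2), ((5, 9), 3), ((5, 11), 4), ((5, 13), 5), ((5, 17), 6), ((5, 25), 7)]

def one_score_alt (hand : String) : Int :=
  let l := hand.toList
  let n : Int := PySem.List.len l
  let pairs : Int :=
    l.foldl (fun p a => l.foldl (fun q b => if a = b then q + 1 else q) p) 0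
  -- RANK[(n, pairs)] raises KeyError when (n, pairs) is not a key (lengths outside 1..5,
  -- excluded by Pre_); getD 0 is a stand-in there.
  let rank : Int := (rankTable.get? (n, pairs)).getD 0
  -- ascii_lowercase.index(c) raises ValueError for a non-lowercase c (excluded by Pre_; getD 0 stand-in)
  let tie : Int := l.foldl
    (fun t c => t * 100 + (((PySem.List.index? asciiLowercaseList c).getD 0 : Int) + 1)) 0
  -- 100 ** (5 - n): the exponent is ≥ 0 for n ≤ 5 (per Pre_; beyond, Python makes a float),
  -- .toNat is exact there.
  rank * 10 ^ 10 + tie * 100 ^ (5 - n).toNat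

-- ===== PRECONDITION & SPEC =====
-- Pre_ excludes: the empty hand (A raises ValueError unpacking counts[-2:]); hands with a
-- character outside a–z (ascii_lowercase.index raises ValueError); hands longer than 5
-- (10 ** (8 - 2*idx) is a float for idx ≥ 5, so A's return is not a value of the declared
-- int type there).
def Pre_one_score (hand : String) : Prop :=
  hand.toList ≠ [] ∧ hand.toList.length ≤ 5 ∧
    hand.toList.all (fun c => 97 ≤ c.toNat && c.toNat ≤ 122) = true
instance (hand : String) : Decidable (Pre_one_score hand) := by unfold Pre_one_score; infer_instance

def pvWitness_one_score : String := "aabbc"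

def Spec_one_score (hand : String) (out : Int) : Prop := out = one_score_alt hand
instance (hand : String) (out : Int) : Decidable (Spec_one_score hand out) := by unfold Spec_one_score; infer_instance

-- ===== CLAIM (what is proved, stated in full; the proofs are below) =====
def Claim_equal_one_score : Prop := ∀ (hand : String), Dom_one_score hand → Pre_one_score hand → Spec_one_score hand (one_score hand)

-- ===== LEMMAS AND PROOFS =====

-- proof-only helpers naming the pieces of the two ports
def countsA (l : List Char) : List Int :=
  PySem.List.sorted
    ((PySem.Set.ofList (l ++ ['.'])).map (fun c => (PySem.List.count l c : Int)))
    (fun x => x) false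

def rankFromCounts (counts : List Int) : Int :=
  let second_count : Int := (PySem.List.pyGet? counts (-2)).getD 0
  let max_count : Int := (PySem.List.pyGet? counts (-1)).getD 0
  let rank : Int := 1
  let rank := if max_count = 5 then 7 else rank
  let rank := if max_count = 4 then 6 else rank
  let rank := if max_count = 3 ∧ second_count = 2 then 5
              else if max_count = 3 then 4 else rank
  if max_count = 2 ∧ second_count = 2 then 3
  else if max_count = 2 then 2 else rank

def rankA (l : List Char) : Int := rankFromCounts (countsA l)

def pairsB (l : List Char) : Int :=
  l.foldl (fun p a => l.foldl (fun q b => if a = b then q + 1 else q) p) 0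

def rankB (l : List Char) : Int :=
  (rankTable.get? ((PySem.List.len l), pairsB l)).getD 0

def tieB (l : List Char) : Int :=
  l.foldl (fun t c => t * 100 + (((PySem.List.index? asciiLowercaseList c).getD 0 : Int) + 1)) 0

def fiveCs : List Char := ['a', 'b', 'c', 'd', 'e']

def handsN : Nat → List (List Char)
  | 0 => [[]]
  | n + 1 => fiveCs.flatMap (fun c => (handsN n).map (c :: ·))

-- all candidate relabeled hands: first char 'a', then up to 4 chars from fiveCs
def handsA : List (List Char) :=
  (List.range 5).flatMap (fun n => (handsN n).map (fun t => 'a' :: t))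

set_option maxRecDepth 8192 in
set_option maxHeartbeats 2000000 in
theorem finite_check : (handsA.all (fun l => rankA l == rankB l)) = true := by decide

theorem mem_handsN (t : List Char) (h : ∀ c ∈ t, c ∈ fiveCs) : t ∈ handsN t.length := by
  induction t with
  | nil => simp [handsN]
  | cons c r ih =>
    simp only [List.length_cons, handsN, List.mem_flatMap, List.mem_map]
    exact ⟨c, h c (by simp), r, ih (fun x hx => h x (by simp [hx])), rfl⟩

theorem idx_lower (c : Char) (h1 : 97 ≤ c.toNat) (h2 : c.toNat ≤ 122) :
    PySem.List.index? asciiLowercaseList c = some (c.toNat - 97) := by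
  have hc : Char.ofNat c.toNat = c := Char.ofNat_toNat c
  rw [← hc]
  interval_cases c.toNat <;> decide

theorem ofList_append_dot (l : List Char) (hdot : ('.':Char) ∉ l) :
    PySem.Set.ofList (l ++ ['.']) = PySem.Set.ofList l ++ ['.'] := by
  rw [PySem.Set.ofList_eq_foldl, List.foldl_append, ← PySem.Set.ofList_eq_foldl]
  show PySem.Set.add (PySem.Set.ofList l) '.' = _
  unfold PySem.Set.add
  simp [PySem.Set.mem_ofList, hdot]

theorem count_map_on {f : Char → Char} (l : List Char)
    (hinj : ∀ x ∈ l, ∀ y ∈ l, f x = f y → x = y) (c : Char) (hc : c ∈ l) :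
    (l.map f).count (f c) = l.count c := by
  rw [List.count_eq_countP, List.count_eq_countP, List.countP_map]
  apply List.countP_congr
  intro x hx
  by_cases hxc : x = c
  · simp [hxc, Function.comp]
  · have : f x ≠ f c := fun h => hxc (hinj x hx c hc h)
    simp [Function.comp, hxc, this]

theorem perm_ofList_map {f : Char → Char} (l : List Char)
    (hinj : ∀ x ∈ l, ∀ y ∈ l, f x = f y → x = y) :
    (PySem.Set.ofList (l.map f)).Perm ((PySem.Set.ofList l).map f) := by
  apply List.perm_of_nodup_nodup_toFinset_eq (PySem.Set.nodup_ofList _)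
  · exact List.Nodup.map_on
      (fun x hx y hy => hinj x ((PySem.Set.mem_ofList l x).mp hx) y ((PySem.Set.mem_ofList l y).mp hy))
      (PySem.Set.nodup_ofList _)
  · ext a
    simp [PySem.Set.mem_ofList, List.mem_map]

theorem countsA_relabel {f : Char → Char} (l : List Char)
    (hinj : ∀ x ∈ l, ∀ y ∈ l, f x = f y → x = y)
    (hdot : ('.':Char) ∉ l) (hdotf : ('.':Char) ∉ l.map f) :
    countsA (l.map f) = countsA l := by
  unfold countsA
  rw [ofList_append_dot l hdot, ofList_append_dot (l.map f) hdotf,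
    List.map_append, List.map_append]
  apply PySem.List.sorted_eq_sorted_of_perm _ _ _ (fun a b h => h)
  apply List.Perm.append
  · have h1 := (perm_ofList_map l hinj).map (fun c => (PySem.List.count (l.map f) c : Int))
    have h2 : ((PySem.Set.ofList l).map f).map (fun c => (PySem.List.count (l.map f) c : Int))
        = (PySem.Set.ofList l).map (fun c => (PySem.List.count l c : Int)) := by
      rw [List.map_map]
      apply List.map_congr_left
      intro a ha
      simp only [Function.comp_apply, PySem.List.count_eq]
      rw [count_map_on l hinj a ((PySem.Set.mem_ofList l a).mp ha)]
    exact h2 ▸ h1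
  · simp [PySem.List.count_eq, List.count_eq_zero.mpr hdot, List.count_eq_zero.mpr hdotf]

theorem pairsB_eq (l : List Char) :
    pairsB l = (l.map (fun a => (l.count a : Int))).sum := by
  unfold pairsB
  have hinner : ∀ (a : Char) (p : Int),
      l.foldl (fun q b => if a = b then q + 1 else q) p = p + (l.count a : Int) := by
    intro a p
    rw [PySem.List.foldl_ite_add_one (p := fun b => a = b)]
    congr 1
    rw [List.count_eq_countP]
    norm_cast
    apply List.countP_congr
    intro x _
    by_cases h : a = x
    · simp [h]
    · have h2 : x ≠ a := fun hh => h hh.symm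
      simp [h, h2]
  calc l.foldl (fun p a => l.foldl (fun q b => if a = b then q + 1 else q) p) 0
      = l.foldl (fun p a => p + (l.count a : Int)) 0 := by
        apply PySem.List.foldl_congr_mem
        intro p a _
        exact hinner a p
    _ = (l.map (fun a => (l.count a : Int))).sum := by
        rw [PySem.List.foldl_add]
        simp

theorem pairsB_relabel {f : Char → Char} (l : List Char)
    (hinj : ∀ x ∈ l, ∀ y ∈ l, f x = f y → x = y) :
    pairsB (l.map f) = pairsB l := by
  rw [pairsB_eq (l.map f), pairsB_eq l, List.map_map]
  congr 1
  apply List.map_congr_left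
  intro a ha
  simp only [Function.comp_apply]
  rw [count_map_on l hinj a ha]

theorem ofList_foldl_prefix (t : List Char) (acc : List Char) :
    ∃ r, t.foldl PySem.Set.add acc = acc ++ r := by
  induction t generalizing acc with
  | nil => exact ⟨[], by simp⟩
  | cons c r ih =>
    obtain ⟨r2, hr2⟩ := ih (PySem.Set.add acc c)
    simp only [List.foldl_cons]
    rw [hr2]
    unfold PySem.Set.add
    by_cases hmem : PySem.Set.contains acc c = true
    · exact ⟨r2, by simp [(PySem.Set.contains_iff acc c).mp hmem]⟩
    · refine ⟨c :: r2, ?_⟩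
      have hnm : c ∉ acc := fun h => hmem ((PySem.Set.contains_iff acc c).mpr h)
      simp [hnm]

theorem rank_main (l : List Char) (hne : l ≠ []) (hlen : l.length ≤ 5)
    (hch : ∀ c ∈ l, 97 ≤ c.toNat ∧ c.toNat ≤ 122) :
    rankA l = rankB l := by
  -- relabel the hand onto the 5-letter alphabet fiveCs via the first-occurrence index
  set d := PySem.Set.ofList l with hd
  set f : Char → Char := fun c => fiveCs.getD ((PySem.List.index? d c).getD 0) 'a' with hf
  have hdlen : d.length ≤ 5 := le_trans (PySem.Set.length_ofList_le l) hlen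
  have hidx : ∀ c ∈ l, ∃ (i : Nat) (hik : i < d.length),
      PySem.List.index? d c = some i ∧ d[i] = c := by
    intro c hc
    have hmem : c ∈ d := (PySem.Set.mem_ofList l c).mpr hc
    obtain ⟨i, hi⟩ := Option.isSome_iff_exists.mp ((PySem.List.index?_isSome_iff d c).mpr hmem)
    obtain ⟨hik, hgc, -⟩ := PySem.List.getElem_of_index?_eq_some hi
    exact ⟨i, hik, hi, hgc⟩
  have hfmem : ∀ c ∈ l, f c ∈ fiveCs := by
    intro c hc
    obtain ⟨i, hik, hi, -⟩ := hidx c hc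
    rw [hf]
    simp only [hi, Option.getD_some]
    rw [List.getD_eq_getElem fiveCs 'a' (by simp [fiveCs]; omega)]
    exact List.getElem_mem _
  have hinj : ∀ x ∈ l, ∀ y ∈ l, f x = f y → x = y := by
    intro x hx y hy hxy
    obtain ⟨i, hik, hi, hgi⟩ := hidx x hx
    obtain ⟨j, hjk, hj, hgj⟩ := hidx y hy
    rw [hf] at hxy
    simp only [hi, hj, Option.getD_some] at hxy
    rw [List.getD_eq_getElem fiveCs 'a' (by simp [fiveCs]; omega),
      List.getD_eq_getElem fiveCs 'a' (by simp [fiveCs]; omega)] at hxy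
    have hij : i = j := (List.Nodup.getElem_inj_iff (by decide)).mp hxy
    subst hij
    rw [← hgi, ← hgj]
  have hdot : ('.':Char) ∉ l := by
    intro h
    have := hch _ h
    simp [Char.toNat] at this
  have hdotf : ('.':Char) ∉ l.map f := by
    intro h
    obtain ⟨c, hc, hfc⟩ := List.mem_map.mp h
    have := hfmem c hc
    rw [hfc] at this
    simp [fiveCs] at this
  -- the relabeled hand starts with 'a' and lives in handsA
  obtain ⟨x, t, rfl⟩ := List.exists_cons_of_ne_nil hne
  have hhead : f x = 'a' := by
    obtain ⟨r, hr⟩ := ofList_foldl_prefix t [x]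
    have hdx : d = x :: r := by
      rw [hd, PySem.Set.ofList_eq_foldl, List.foldl_cons]
      have hadd : PySem.Set.add ([] : List Char) x = [x] := rfl
      rw [hadd, hr]
      rfl
    rw [hf]
    simp only [hdx, PySem.List.index?_cons_self, Option.getD_some]
    rfl
  have hmemA : (x :: t).map f ∈ handsA := by
    have h1 : (t.map f) ∈ handsN (t.map f).length :=
      mem_handsN _ (fun c hc => by
        obtain ⟨y, hy, rfl⟩ := List.mem_map.mp hc
        exact hfmem y (by simp [hy]))
    have h2 : (t.map f).length < 5 := by
      simp only [List.length_map]
      have := hlen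
      simp only [List.length_cons] at this
      omega
    unfold handsA
    rw [List.mem_flatMap]
    refine ⟨(t.map f).length, by simp only [List.mem_range]; simpa using h2, ?_⟩
    rw [List.mem_map]
    exact ⟨t.map f, h1, by simp [hhead]⟩
  -- A and B agree on every candidate relabeled hand
  have hfin : rankA ((x :: t).map f) = rankB ((x :: t).map f) := by
    have := List.all_eq_true.mp finite_check _ hmemA
    simpa using this
  -- both ranks are invariant under the relabeling
  have hA : rankA ((x :: t).map f) = rankA (x :: t) :=
    congrArg rankFromCounts (countsA_relabel (x :: t) hinj hdot hdotf)
  have hB : rankB ((x :: t).map f) = rankB (x :: t) := by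
    unfold rankB
    rw [pairsB_relabel (x :: t) hinj]
    simp [PySem.List.len_eq]
  rw [← hA, hfin, hB]

theorem pos_main (l : List Char) (hlen : l.length ≤ 5)
    (hch : ∀ c ∈ l, 97 ≤ c.toNat ∧ c.toNat ≤ 122) :
    ((PySem.List.enumerate l 0).map
      (fun p => 10 ^ ((8 - 2 * p.1).toNat) *
        (((PySem.List.index? asciiLowercaseList p.2).getD 0 : Int) + 1))).sum
    = tieB l * 100 ^ ((5 - PySem.List.len l).toNat) := by
  rcases l with _ | ⟨a, _ | ⟨b, _ | ⟨c, _ | ⟨d, _ | ⟨e, _ | ⟨x, t⟩⟩⟩⟩⟩⟩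
  · simp [tieB, PySem.List.enumerate_nil, PySem.List.len_eq]
  · -- [a]
    obtain ⟨ha1, ha2⟩ := hch a (by simp)
    simp only [PySem.List.enumerate_cons, PySem.List.enumerate_nil, List.map_cons, List.map_nil,
      List.sum_cons, List.sum_nil, tieB, List.foldl_cons, List.foldl_nil,
      PySem.List.len_eq, List.length_cons, List.length_nil]
    rw [idx_lower a ha1 ha2]
    simp only [Option.getD_some]
    push_cast [Int.ofNat_sub ha1]
    norm_num
    ring
  · -- [a, b]
    obtain ⟨ha1, ha2⟩ := hch a (by simp)
    obtain ⟨hb1, hb2⟩ := hch b (by simp)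
    simp only [PySem.List.enumerate_cons, PySem.List.enumerate_nil, List.map_cons, List.map_nil,
      List.sum_cons, List.sum_nil, tieB, List.foldl_cons, List.foldl_nil,
      PySem.List.len_eq, List.length_cons, List.length_nil]
    rw [idx_lower a ha1 ha2, idx_lower b hb1 hb2]
    simp only [Option.getD_some]
    push_cast [Int.ofNat_sub ha1, Int.ofNat_sub hb1]
    norm_num
    ring
  · -- [a, b, c]
    obtain ⟨ha1, ha2⟩ := hch a (by simp)
    obtain ⟨hb1, hb2⟩ := hch b (by simp)
    obtain ⟨hc1, hc2⟩ := hch c (by simp)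
    simp only [PySem.List.enumerate_cons, PySem.List.enumerate_nil, List.map_cons, List.map_nil,
      List.sum_cons, List.sum_nil, tieB, List.foldl_cons, List.foldl_nil,
      PySem.List.len_eq, List.length_cons, List.length_nil]
    rw [idx_lower a ha1 ha2, idx_lower b hb1 hb2, idx_lower c hc1 hc2]
    simp only [Option.getD_some]
    push_cast [Int.ofNat_sub ha1, Int.ofNat_sub hb1, Int.ofNat_sub hc1]
    norm_num
    ring
  · -- [a, b, c, d]
    obtain ⟨ha1, ha2⟩ := hch a (by simp)
    obtain ⟨hb1, hb2⟩ := hch b (by simp)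
    obtain ⟨hc1, hc2⟩ := hch c (by simp)
    obtain ⟨hd1, hd2⟩ := hch d (by simp)
    simp only [PySem.List.enumerate_cons, PySem.List.enumerate_nil, List.map_cons, List.map_nil,
      List.sum_cons, List.sum_nil, tieB, List.foldl_cons, List.foldl_nil,
      PySem.List.len_eq, List.length_cons, List.length_nil]
    rw [idx_lower a ha1 ha2, idx_lower b hb1 hb2, idx_lower c hc1 hc2, idx_lower d hd1 hd2]
    simp only [Option.getD_some]
    push_cast [Int.ofNat_sub ha1, Int.ofNat_sub hb1, Int.ofNat_sub hc1, Int.ofNat_sub hd1]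
    norm_num
    ring
  · -- [a, b, c, d, e]
    obtain ⟨ha1, ha2⟩ := hch a (by simp)
    obtain ⟨hb1, hb2⟩ := hch b (by simp)
    obtain ⟨hc1, hc2⟩ := hch c (by simp)
    obtain ⟨hd1, hd2⟩ := hch d (by simp)
    obtain ⟨he1, he2⟩ := hch e (by simp)
    simp only [PySem.List.enumerate_cons, PySem.List.enumerate_nil, List.map_cons, List.map_nil,
      List.sum_cons, List.sum_nil, tieB, List.foldl_cons, List.foldl_nil,
      PySem.List.len_eq, List.length_cons, List.length_nil]
    rw [idx_lower a ha1 ha2, idx_lower b hb1 hb2, idx_lower c hc1 hc2, idx_lower d hd1 hd2, idx_lower e he1 he2]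
    simp only [Option.getD_some]
    push_cast [Int.ofNat_sub ha1, Int.ofNat_sub hb1, Int.ofNat_sub hc1, Int.ofNat_sub hd1, Int.ofNat_sub he1]
    norm_num
    ring
  · simp only [List.length_cons] at hlen
    omega

theorem one_score_eq (hand : String) :
    one_score hand = rankA hand.toList * 10 ^ 10 +
      ((PySem.List.enumerate hand.toList 0).map
        (fun p => 10 ^ ((8 - 2 * p.1).toNat) *
          (((PySem.List.index? asciiLowercaseList p.2).getD 0 : Int) + 1))).sum := by
  simp only [one_score, rankA, rankFromCounts, countsA]
  rw [PySem.List.foldl_add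
    (g := fun p : Int × Char => 10 ^ ((8 - 2 * p.1).toNat) *
      (((PySem.List.index? asciiLowercaseList p.2).getD 0 : Int) + 1))]
  rfl

theorem one_score_alt_eq (hand : String) :
    one_score_alt hand = rankB hand.toList * 10 ^ 10 +
      tieB hand.toList * 100 ^ ((5 - PySem.List.len hand.toList).toNat) := by
  simp only [one_score_alt, rankB, pairsB, tieB]

-- ===== VERDICT (by name: the statement is the Claim_ definition above) =====
theorem one_score_spec : Claim_equal_one_score := by
  intro hand _ hpre
  obtain ⟨hne, hlen, hchars⟩ := hpre
  have hch : ∀ c ∈ hand.toList, 97 ≤ c.toNat ∧ c.toNat ≤ 122 := by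
    intro c hc
    have := List.all_eq_true.mp hchars c hc
    simpa using this
  show one_score hand = one_score_alt hand
  rw [one_score_eq, one_score_alt_eq, pos_main hand.toList hlen hch,
    rank_main hand.toList hne hlen hch]
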